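-- pv_equiv track=rewrite | github.com/A7lam-4agm/CS481--amazon-reviews-sentiment-analysis | src/vectorizer.py | vectorize_document
-- ===== SOURCE A (Python) =====
-- def vectorize_document(tokens, vocab):
--     vector = {}
--     for word in tokens:
--         if word in vocab:
--             if word in vector:
--                 vector[word] += 1
--             else:
--                 vector[word] = 1
--     return vector
-- ===== SOURCE B (Python) =====
-- def vectorize_document(tokens, vocab):
--     # Count every token once, then keep only in-vocab words (insertion order of
--     # first occurrence is preserved, matching A's dict order).
--     counts = {}
--     for word in tokens:
--         counts[word] = counts.get(word, 0) + 1
--     vs = set(vocab)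
--     return {w: c for w, c in counts.items() if w in vs}
-- ===== Notes on version B (the rewrite author's own statement) =====
-- stated objective: alternative
-- what changed: B counts all tokens in one unconditional pass and then filters the count table once against a set of the vocabulary, instead of A's per-token membership test against the vocab list; it trades per-token vocab scans for counting out-of-vocab tokens too.
import Mathlib
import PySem

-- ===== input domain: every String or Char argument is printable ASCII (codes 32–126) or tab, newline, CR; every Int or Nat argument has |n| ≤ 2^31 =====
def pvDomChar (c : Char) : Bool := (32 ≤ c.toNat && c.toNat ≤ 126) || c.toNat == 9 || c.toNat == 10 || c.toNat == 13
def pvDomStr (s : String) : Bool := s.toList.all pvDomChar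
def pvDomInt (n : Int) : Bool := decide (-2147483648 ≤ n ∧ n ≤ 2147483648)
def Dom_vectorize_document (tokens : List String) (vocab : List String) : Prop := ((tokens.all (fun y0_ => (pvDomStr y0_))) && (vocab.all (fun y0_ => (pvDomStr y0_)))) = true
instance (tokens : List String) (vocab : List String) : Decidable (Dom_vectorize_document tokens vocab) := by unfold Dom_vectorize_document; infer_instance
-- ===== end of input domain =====

-- B counts all tokens in one unconditional pass, then filters the count table once against a
-- set of the vocabulary, instead of A's per-token membership test against the vocab list.


-- ===== PORT A =====
def vectorize_document (tokens : List String) (vocab : List String) : List (String × Int) :=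
  (tokens.foldl (fun vector word =>
      if vocab.contains word then
        if vector.contains word then vector.insert word (vector.getD word 0 + 1)
        else vector.insert word 1
      else vector) (PySem.Dict.empty : PySem.Dict String Int)).items

-- ===== PORT B =====
def vectorize_document_alt (tokens : List String) (vocab : List String) : List (String × Int) :=
  let counts := tokens.foldl (fun d word => d.insert word (d.getD word 0 + 1))
      (PySem.Dict.empty : PySem.Dict String Int)
  let vs : PySem.Set String := PySem.Set.ofList vocab
  -- counts has unique keys, so the dict comprehension over its items is exactly this filtered list
  counts.items.filter (fun p => vs.contains p.1)

-- ===== PRECONDITION & SPEC =====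
def Spec_vectorize_document (tokens : List String) (vocab : List String) (out : List (String × Int)) : Prop := out = vectorize_document_alt tokens vocab
instance (tokens : List String) (vocab : List String) (out : List (String × Int)) : Decidable (Spec_vectorize_document tokens vocab out) := by unfold Spec_vectorize_document; infer_instance

-- ===== CLAIM (what is proved, stated in full; the proofs are below) =====
def Claim_equal_vectorize_document : Prop := ∀ (tokens : List String) (vocab : List String), Dom_vectorize_document tokens vocab → Spec_vectorize_document tokens vocab (vectorize_document tokens vocab)

-- ===== LEMMAS AND PROOFS =====

-- Abbreviation for the proofs: filter a pair list to in-vocab keys.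
def pvFilt (vocab : List String) (l : List (String × Int)) : List (String × Int) :=
  l.filter (fun p => vocab.contains p.1)

lemma pvFilt_nil (vocab : List String) : pvFilt vocab [] = [] := rfl

lemma pvFilt_cons_mem (vocab : List String) (p : String × Int) (l : List (String × Int))
    (h : p.1 ∈ vocab) : pvFilt vocab (p :: l) = p :: pvFilt vocab l := by
  simp [pvFilt, h]

lemma pvFilt_cons_not_mem (vocab : List String) (p : String × Int) (l : List (String × Int))
    (h : p.1 ∉ vocab) : pvFilt vocab (p :: l) = pvFilt vocab l := by
  simp [pvFilt, h]

lemma pvGet_mk_filt (vocab : List String) (l : List (String × Int)) (w : String)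
    (hw : w ∈ vocab) :
    (PySem.Dict.mk (pvFilt vocab l)).get? w = (PySem.Dict.mk l).get? w := by
  induction l with
  | nil => rfl
  | cons p rest ih =>
    obtain ⟨k, v⟩ := p
    by_cases hk : k = w
    · subst hk
      rw [pvFilt_cons_mem vocab _ rest hw]
      rw [PySem.Dict.get?_mk_cons, PySem.Dict.get?_mk_cons]
      simp
    · by_cases hq : k ∈ vocab
      · rw [pvFilt_cons_mem vocab _ rest hq]
        rw [PySem.Dict.get?_mk_cons, PySem.Dict.get?_mk_cons]
        have : (k == w) = false := by simpa using hk
        rw [this]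
        simpa using ih
      · rw [pvFilt_cons_not_mem vocab _ rest hq]
        rw [PySem.Dict.get?_mk_cons]
        have : (k == w) = false := by simpa using hk
        rw [this]
        simpa using ih

lemma pvContains_mk_filt (vocab : List String) (l : List (String × Int)) (w : String)
    (hw : w ∈ vocab) :
    (PySem.Dict.mk (pvFilt vocab l)).contains w = (PySem.Dict.mk l).contains w := by
  simp only [PySem.Dict.contains_mk]
  induction l with
  | nil => rfl
  | cons p rest ih =>
    by_cases hq : p.1 ∈ vocab
    · rw [pvFilt_cons_mem vocab p rest hq, List.any_cons, List.any_cons, ih]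
    · rw [pvFilt_cons_not_mem vocab p rest hq, List.any_cons, ih]
      have hk : (p.1 == w) = false := by
        have : p.1 ≠ w := fun h => hq (h ▸ hw)
        simpa using this
      rw [hk, Bool.false_or]

lemma pvFilt_map_replace (vocab : List String) (l : List (String × Int)) (w : String) (v : Int)
    (hw : w ∈ vocab) :
    pvFilt vocab (l.map (fun p => if p.1 == w then (w, v) else p))
      = (pvFilt vocab l).map (fun p => if p.1 == w then (w, v) else p) := by
  induction l with
  | nil => rfl
  | cons p rest ih =>
    rw [List.map_cons]
    by_cases hk : p.1 = w
    · have hb : (p.1 == w) = true := by simpa using hk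
      rw [if_pos hb]
      rw [pvFilt_cons_mem vocab (w, v) _ hw, pvFilt_cons_mem vocab p rest (hk ▸ hw)]
      rw [List.map_cons, if_pos hb, ih]
    · have hb : (p.1 == w) = false := by simpa using hk
      rw [if_neg (by simp [hb])]
      by_cases hq : p.1 ∈ vocab
      · rw [pvFilt_cons_mem vocab p _ hq, pvFilt_cons_mem vocab p rest hq,
          List.map_cons, if_neg (by simp [hb]), ih]
      · rw [pvFilt_cons_not_mem vocab p _ hq, pvFilt_cons_not_mem vocab p rest hq, ih]

lemma pvFilt_map_replace_not_mem (vocab : List String) (l : List (String × Int)) (w : String)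
    (v : Int) (hw : w ∉ vocab) :
    pvFilt vocab (l.map (fun p => if p.1 == w then (w, v) else p)) = pvFilt vocab l := by
  induction l with
  | nil => rfl
  | cons p rest ih =>
    rw [List.map_cons]
    by_cases hk : p.1 = w
    · have hb : (p.1 == w) = true := by simpa using hk
      rw [if_pos hb]
      rw [pvFilt_cons_not_mem vocab (w, v) _ hw, pvFilt_cons_not_mem vocab p rest (hk ▸ hw), ih]
    · have hb : (p.1 == w) = false := by simpa using hk
      rw [if_neg (by simp [hb])]
      by_cases hq : p.1 ∈ vocab
      · rw [pvFilt_cons_mem vocab p _ hq, pvFilt_cons_mem vocab p rest hq, ih]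
      · rw [pvFilt_cons_not_mem vocab p _ hq, pvFilt_cons_not_mem vocab p rest hq, ih]

lemma pvFilt_append (vocab : List String) (l l' : List (String × Int)) :
    pvFilt vocab (l ++ l') = pvFilt vocab l ++ pvFilt vocab l' := by
  simp [pvFilt, List.filter_append]

lemma pvFilt_insert_mem (vocab : List String) (d : PySem.Dict String Int) (w : String) (v : Int)
    (hw : w ∈ vocab) :
    PySem.Dict.mk (pvFilt vocab (d.insert w v).items)
      = (PySem.Dict.mk (pvFilt vocab d.items)).insert w v := by
  apply PySem.Dict.ext
  rw [PySem.Dict.items_insert, PySem.Dict.items_insert]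
  rw [pvContains_mk_filt vocab d.items w hw]
  have hdc : (PySem.Dict.mk d.items).contains w = d.contains w := rfl
  rw [hdc]
  cases hc : d.contains w with
  | true =>
    rw [if_pos rfl, if_pos rfl]
    exact pvFilt_map_replace vocab d.items w v hw
  | false =>
    rw [if_neg (by simp), if_neg (by simp)]
    rw [pvFilt_append, pvFilt_cons_mem vocab (w, v) [] hw, pvFilt_nil]

lemma pvFilt_insert_not_mem (vocab : List String) (d : PySem.Dict String Int) (w : String)
    (v : Int) (hw : w ∉ vocab) :
    pvFilt vocab (d.insert w v).items = pvFilt vocab d.items := by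
  rw [PySem.Dict.items_insert]
  cases hc : d.contains w with
  | true =>
    rw [if_pos rfl]
    exact pvFilt_map_replace_not_mem vocab d.items w v hw
  | false =>
    rw [if_neg (by simp)]
    rw [pvFilt_append, pvFilt_cons_not_mem vocab (w, v) [] hw, pvFilt_nil, List.append_nil]

-- The A-loop on the filtered dict tracks the B-loop on the full count dict.
lemma pvLoop (vocab : List String) : ∀ (tokens : List String) (d : PySem.Dict String Int),
    tokens.foldl (fun vector word =>
      if vocab.contains word then
        if vector.contains word then vector.insert word (vector.getD word 0 + 1)
        else vector.insert word 1
      else vector) (PySem.Dict.mk (pvFilt vocab d.items))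
    = PySem.Dict.mk (pvFilt vocab
        ((tokens.foldl (fun d word => d.insert word (d.getD word 0 + 1)) d).items)) := by
  intro tokens
  induction tokens with
  | nil => intro d; rfl
  | cons w ts ih =>
    intro d
    have hstep :
        (if vocab.contains w then
          if (PySem.Dict.mk (pvFilt vocab d.items)).contains w then
            (PySem.Dict.mk (pvFilt vocab d.items)).insert w
              ((PySem.Dict.mk (pvFilt vocab d.items)).getD w 0 + 1)
          else (PySem.Dict.mk (pvFilt vocab d.items)).insert w 1
         else PySem.Dict.mk (pvFilt vocab d.items))
        = PySem.Dict.mk (pvFilt vocab ((d.insert w (d.getD w 0 + 1)).items)) := by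
      by_cases hw : w ∈ vocab
      · have hwc : vocab.contains w = true := by simpa using hw
        rw [pvFilt_insert_mem vocab d w (d.getD w 0 + 1) hw]
        have hg : (PySem.Dict.mk (pvFilt vocab d.items)).getD w 0 = d.getD w 0 := by
          rw [PySem.Dict.getD_eq_get?_getD, PySem.Dict.getD_eq_get?_getD,
            pvGet_mk_filt vocab d.items w hw]
        rw [hwc, if_pos rfl]
        cases hc : (PySem.Dict.mk (pvFilt vocab d.items)).contains w with
        | true => rw [if_pos rfl, hg]
        | false =>
          rw [if_neg (by simp)]
          have h0 : (PySem.Dict.mk (pvFilt vocab d.items)).getD w 0 = 0 :=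
            PySem.Dict.getD_of_not_contains _ _ hc
          have h1 : d.getD w 0 = 0 := by rw [← hg, h0]
          rw [h1]
          norm_num
      · have hwc : vocab.contains w = false := by simpa using hw
        rw [pvFilt_insert_not_mem vocab d w (d.getD w 0 + 1) hw, hwc, if_neg (by simp)]
    simp only [List.foldl_cons]
    rw [hstep, ih (d.insert w (d.getD w 0 + 1))]

lemma pvSetContains (vocab : List String) (x : String) :
    (PySem.Set.ofList vocab).contains x = vocab.contains x := by
  by_cases h : x ∈ vocab
  · simp [h, (PySem.Set.mem_ofList vocab x).mpr h]
  · have h2 : x ∉ PySem.Set.ofList vocab := fun hx => h ((PySem.Set.mem_ofList vocab x).mp hx)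
    simp [h, h2]

-- ===== VERDICT (by name: the statement is the Claim_ definition above) =====
theorem vectorize_document_spec : Claim_equal_vectorize_document := by
  intro tokens vocab _
  unfold Spec_vectorize_document vectorize_document vectorize_document_alt
  have h := pvLoop vocab tokens PySem.Dict.empty
  have he : (PySem.Dict.mk (pvFilt vocab (PySem.Dict.empty : PySem.Dict String Int).items))
      = (PySem.Dict.empty : PySem.Dict String Int) := rfl
  rw [he] at h
  rw [h]
  simp only [pvFilt]
  exact List.filter_congr (fun p _ => by rw [pvSetContains])
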